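-- pv_equiv track=rewrite | github.com/charaybids/MITB-Assignments | Algo Design and Implementation/Assignment 3/A3Q1.py | min_shot
-- ===== SOURCE A (Python) =====
-- def min_shot(colors):
--     n = len(colors)
--
--     # Initialize a DP table to store the minimum shots for each subrange
--     dp = [[float('inf')] * n for _ in range(n)]  # O(n^2), initializing an n x n matrix with infinity
--
--     # Base cases: Single balls require 1 shot
--     for i in range(n):  # O(n), filling the diagonal with 1
--         dp[i][i] = 1
--
--     # Base case for two adjacent balls  # O(n), since running n - 1 times
--     for i in range(n - 1):
--         dp[i][i + 1] = 1 if colors[i] == colors[i + 1] else 2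
--
--     # Fill the DP table for ranges of length 3 to n
--     for length in range(3, n + 1):  # O(n^3), since running 3 for loops with O(n) times each
--         # length of the subproblem
--         for left in range(n - length + 1):
--             right = left + length - 1
--
--             # Case 1: Try merging the ends if colors[left] == colors[right]
--             if colors[left] == colors[right]:
--                 dp[left][right] = dp[left + 1][right - 1]
--
--             # Case 2: Try splitting the range at all possible midpoints
--             for mid in range(left, right):
--                 dp[left][right] = min(dp[left][right], dp[left][mid] + dp[mid + 1][right])
--
--     # Return the minimum number of shots needed to clear the entire sequence
--     return dp[0][n - 1]
-- ===== SOURCE B (Python) =====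
-- def min_shot(colors):
--     n = len(colors)
--     memo = {}
--
--     def rec(i, j):
--         if i == j:
--             return 1
--         if j == i + 1:
--             return 1 if colors[i] == colors[j] else 2
--         key = (i, j)
--         if key in memo:
--             return memo[key]
--         best = rec(i + 1, j - 1) if colors[i] == colors[j] else float('inf')
--         for mid in range(i, j):
--             best = min(best, rec(i, mid) + rec(mid + 1, j))
--         memo[key] = best
--         return best
--
--     return rec(0, n - 1)
-- ===== Notes on version B (the rewrite author's own statement) =====
-- stated objective: alternative
-- what changed: Replaces the bottom-up n-by-n interval-DP table with top-down memoized recursion rec(i,j) over subranges, computing only reachable subproblems.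
import Mathlib
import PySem

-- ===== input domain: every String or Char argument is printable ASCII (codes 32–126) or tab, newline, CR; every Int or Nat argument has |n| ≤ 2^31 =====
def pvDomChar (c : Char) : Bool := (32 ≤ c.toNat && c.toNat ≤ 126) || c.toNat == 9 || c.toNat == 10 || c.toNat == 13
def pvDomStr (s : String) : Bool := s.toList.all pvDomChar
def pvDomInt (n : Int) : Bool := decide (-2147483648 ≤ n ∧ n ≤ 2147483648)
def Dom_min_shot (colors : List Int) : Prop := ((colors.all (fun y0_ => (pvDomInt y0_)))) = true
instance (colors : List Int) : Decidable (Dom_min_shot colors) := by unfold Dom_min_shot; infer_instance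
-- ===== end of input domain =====

-- B replaces the bottom-up n×n interval-DP table with top-down recursion over subranges
-- (memoized in Python; ported as fuel recursion): an alternative decomposition, same asymptotic cost.


-- ===== PORT A =====
-- float('inf') entries are modelled as `none`; `pvMinO`/`pvAddO` are Python's min/+ on int-or-inf.
def pvMinO : Option Int → Option Int → Option Int
  | none, b => b
  | some a, none => some a
  | some a, some b => some (min a b)

def pvAddO : Option Int → Option Int → Option Int
  | some a, some b => some (a + b)
  | _, _ => none

-- dp[i][j] read / write on the list-of-lists table
def pvGet2 (dp : List (List (Option Int))) (i j : Nat) : Option Int :=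
  (dp.getD i []).getD j none

def pvSet2 (dp : List (List (Option Int))) (i j : Nat) (v : Option Int) :
    List (List (Option Int)) :=
  dp.set i ((dp.getD i []).set j v)

-- innermost loop body: dp[left][right] = min(dp[left][right], dp[left][mid] + dp[mid+1][right])
def pvBodyMid (left right : Nat) (dp : List (List (Option Int))) (mid : Nat) :
    List (List (Option Int)) :=
  pvSet2 dp left right (pvMinO (pvGet2 dp left right) (pvAddO (pvGet2 dp left mid) (pvGet2 dp (mid+1) right)))

-- body of the `left` loop
def pvBodyLeft (colors : List Int) (len : Nat) (dp : List (List (Option Int))) (left : Nat) :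
    List (List (Option Int)) :=
  let right := left + len - 1
  let dpA := if colors.getD left 0 = colors.getD right 0
             then pvSet2 dp left right (pvGet2 dp (left+1) (right-1)) else dp
  (List.range' left (right - left)).foldl (pvBodyMid left right) dpA

-- body of the `length` loop
def pvBodyLen (colors : List Int) (n : Nat) (dp : List (List (Option Int))) (len : Nat) :
    List (List (Option Int)) :=
  (List.range' 0 (n - len + 1)).foldl (pvBodyLeft colors len) dp

def min_shot (colors : List Int) : Int :=
  let n := colors.length
  let dp0 := List.replicate n (List.replicate n (none : Option Int))
  let dp1 := (List.range' 0 n).foldl (fun dp i => pvSet2 dp i i (some 1)) dp0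
  let dp2 := (List.range' 0 (n - 1)).foldl
      (fun dp i => pvSet2 dp i (i+1)
        (some (if colors.getD i 0 = colors.getD (i+1) 0 then (1:Int) else 2))) dp1
  let dp3 := (List.range' 3 (n - 2)).foldl (pvBodyLen colors n) dp2
  (pvGet2 dp3 0 (n - 1)).getD 0

-- ===== PORT B =====
-- rec(i,j) of Source B; the memo dict only speeds Python up, the recursion is ported directly
-- with fuel ≥ j - i making it structural (values are unchanged).
def recB (colors : List Int) : Nat → Nat → Nat → Int
  | 0, _, _ => 1
  | f+1, i, j =>
    if i = j then 1
    else if j = i + 1 then (if colors.getD i 0 = colors.getD j 0 then 1 else 2)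
    else
      let base : Option Int :=
        if colors.getD i 0 = colors.getD j 0 then some (recB colors f (i+1) (j-1)) else none
      ((List.range' i (j - i)).foldl
        (fun acc mid => pvMinO acc (some (recB colors f i mid + recB colors f (mid+1) j))) base).getD 0

def min_shot_alt (colors : List Int) : Int :=
  recB colors (colors.length - 1) 0 (colors.length - 1)

-- ===== PRECONDITION & SPEC =====
-- Pre_ excludes only the empty list, on which Python A raises IndexError (dp[0][-1] on an empty table).
def Pre_min_shot (colors : List Int) : Prop := colors ≠ []
instance (colors : List Int) : Decidable (Pre_min_shot colors) := by unfold Pre_min_shot; infer_instance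
def pvWitness_min_shot : List Int := [1, 2, 1]

def Spec_min_shot (colors : List Int) (out : Int) : Prop := out = min_shot_alt colors
instance (colors : List Int) (out : Int) : Decidable (Spec_min_shot colors out) := by unfold Spec_min_shot; infer_instance

-- ===== CLAIM (what is proved, stated in full; the proofs are below) =====
def Claim_equal_min_shot : Prop := ∀ (colors : List Int), Dom_min_shot colors → Pre_min_shot colors → Spec_min_shot colors (min_shot colors)

-- ===== LEMMAS AND PROOFS =====

-- `recB` is fuel-independent once the fuel covers the gap
theorem recB_mono (colors : List Int) (f : Nat) : ∀ (g i j : Nat), i ≤ j →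
    j - i ≤ f → j - i ≤ g → recB colors f i j = recB colors g i j := by
  induction f using Nat.strong_induction_on with
  | _ f IH =>
    intro g i j hij hf hg
    rcases f with _ | f
    · have : i = j := by omega
      subst this
      rcases g with _ | g <;> simp [recB]
    · rcases g with _ | g
      · have : i = j := by omega
        subst this; simp [recB]
      · by_cases h1 : i = j
        · subst h1; simp [recB]
        · by_cases h2 : j = i + 1
          · subst h2; simp [recB]
          · have hd : i + 2 ≤ j := by omega
            simp only [recB, if_neg h1, if_neg h2]
            have hb : recB colors f (i+1) (j-1) = recB colors g (i+1) (j-1) :=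
              IH f (by omega) g (i+1) (j-1) (by omega) (by omega) (by omega)
            rw [hb]
            congr 1
            apply PySem.List.foldl_congr_mem
            intro acc mid hmid
            rw [List.mem_range'_1] at hmid
            rw [IH f (by omega) g i mid (by omega) (by omega) (by omega),
                IH f (by omega) g (mid+1) j (by omega) (by omega) (by omega)]

-- the specification value: rec(i,j) with exactly enough fuel
def pvS (colors : List Int) (i j : Nat) : Int := recB colors (j - i) i j

-- the option-valued min-fold that both programs compute for a gap ≥ 2
def pvSO (colors : List Int) (i j : Nat) : Option Int :=
  (List.range' i (j - i)).foldl
    (fun acc mid => pvMinO acc (some (pvS colors i mid + pvS colors (mid+1) j)))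
    (if colors.getD i 0 = colors.getD j 0 then some (pvS colors (i+1) (j-1)) else none)

theorem foldl_minO_isSome_aux (g : Nat → Int) (l : List Nat) : ∀ (a : Int),
    (l.foldl (fun acc x => pvMinO acc (some (g x))) (some a)).isSome := by
  induction l with
  | nil => intro a; rfl
  | cons x xs ih => intro a; simpa [pvMinO] using ih (min a (g x))

theorem foldl_minO_isSome (g : Nat → Int) (l : List Nat) (b : Option Int) (h : l ≠ []) :
    (l.foldl (fun acc x => pvMinO acc (some (g x))) b).isSome := by
  match l with
  | x :: xs =>
    cases b with
    | none => simpa [pvMinO] using foldl_minO_isSome_aux g xs (g x)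
    | some a => simpa [pvMinO] using foldl_minO_isSome_aux g xs (min a (g x))

theorem pvSO_eq (colors : List Int) (i j : Nat) (h2 : i + 2 ≤ j) :
    pvSO colors i j = some (pvS colors i j) := by
  have hne : List.range' i (j - i) ≠ [] := by
    apply List.ne_nil_of_length_pos
    simp [List.length_range']
    omega
  have hgd : pvS colors i j = (pvSO colors i j).getD 0 := by
    obtain ⟨f, hf⟩ : ∃ f, j - i = f + 1 := ⟨j - i - 1, by omega⟩
    show recB colors (j - i) i j = _
    rw [hf]
    simp only [recB, if_neg (show ¬ i = j by omega), if_neg (show ¬ j = i + 1 by omega)]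
    unfold pvSO
    simp only [pvS]
    congr 1
    rw [recB_mono colors f (j-1-(i+1)) (i+1) (j-1) (by omega) (by omega) (by omega)]
    apply PySem.List.foldl_congr_mem
    intro acc mid hmid
    rw [List.mem_range'_1] at hmid
    rw [recB_mono colors f (mid - i) i mid (by omega) (by omega) (by omega),
        recB_mono colors f (j - (mid+1)) (mid+1) j (by omega) (by omega) (by omega)]
  obtain ⟨v, hv⟩ := Option.isSome_iff_exists.mp
    (foldl_minO_isSome (fun mid => pvS colors i mid + pvS colors (mid+1) j) _ _ hne)
  have hso : pvSO colors i j = some v := hv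
  rw [hso] at hgd ⊢
  simp at hgd
  rw [hgd]

def pvShape (n : Nat) (dp : List (List (Option Int))) : Prop :=
  dp.length = n ∧ ∀ i, i < n → (dp.getD i []).length = n

-- cells of gap ≤ L-1, plus gap-L cells with row < m, hold the spec value; everything else is inf
def pvFilled (colors : List Int) (n L m : Nat) (dp : List (List (Option Int))) : Prop :=
  ∀ i j, i < n → j < n →
    pvGet2 dp i j =
      if i ≤ j ∧ (j + 1 - i ≤ L ∨ (j + 1 - i = L + 1 ∧ i < m)) then some (pvS colors i j) else none

theorem pv_getD_set {a : Type} (l : List a) (i : Nat) (v d : a) (j : Nat) :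
    (l.set i v).getD j d = if j = i ∧ i < l.length then v else l.getD j d := by
  simp only [List.getD_eq_getElem?_getD, List.getElem?_set]
  split_ifs <;> simp_all

theorem pvShape_set2 (n : Nat) (dp : List (List (Option Int))) (hs : pvShape n dp)
    (i j : Nat) (v : Option Int) : pvShape n (pvSet2 dp i j v) := by
  refine ⟨by simp [pvSet2, hs.1], ?_⟩
  intro k hk
  unfold pvSet2
  rw [pv_getD_set]
  split_ifs with h
  · rw [List.length_set]
    exact hs.2 i (by omega : i < n)
  · exact hs.2 k hk

theorem pvGet2_set2 (n : Nat) (dp : List (List (Option Int))) (hs : pvShape n dp)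
    (i j : Nat) (hi : i < n) (hj : j < n) (v : Option Int) (i' j' : Nat) :
    pvGet2 (pvSet2 dp i j v) i' j' = if i' = i ∧ j' = j then v else pvGet2 dp i' j' := by
  have hlen : dp.length = n := hs.1
  have hrow : (dp.getD i []).length = n := hs.2 i hi
  unfold pvGet2 pvSet2
  rw [pv_getD_set]
  by_cases h : i' = i
  · subst h
    rw [if_pos ⟨rfl, by omega⟩, pv_getD_set]
    by_cases h2 : j' = j
    · subst h2
      rw [if_pos ⟨rfl, by omega⟩, if_pos ⟨rfl, rfl⟩]
    · rw [if_neg (by tauto), if_neg (by tauto)]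
  · rw [if_neg (by tauto), if_neg (by tauto)]

theorem pvGet2_replicate (n i j : Nat) :
    pvGet2 (List.replicate n (List.replicate n (none : Option Int))) i j = none := by
  unfold pvGet2
  by_cases hi : i < n <;> by_cases hj : j < n <;>
    simp [List.getD_eq_getElem?_getD, hi, hj]

theorem pvShape_replicate (n : Nat) :
    pvShape n (List.replicate n (List.replicate n (none : Option Int))) := by
  refine ⟨by simp, ?_⟩
  intro i hi
  simp [List.getD_eq_getElem?_getD, hi]

theorem pvS_diag (colors : List Int) (i : Nat) : pvS colors i i = 1 := by
  simp [pvS, recB]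

theorem pvS_adj (colors : List Int) (i : Nat) :
    pvS colors i (i+1) = if colors.getD i 0 = colors.getD (i+1) 0 then 1 else 2 := by
  show recB colors (i + 1 - i) i (i+1) = _
  rw [(by omega : i + 1 - i = 1)]
  simp only [recB]
  rw [if_neg (by omega)]
  simp

theorem pvFilled_shift (colors : List Int) (n L m L' m' : Nat) (dp : List (List (Option Int)))
    (h : ∀ i j, i < n → j < n → i ≤ j →
      ((j + 1 - i ≤ L ∨ (j + 1 - i = L + 1 ∧ i < m)) ↔ (j + 1 - i ≤ L' ∨ (j + 1 - i = L' + 1 ∧ i < m'))))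
    (H : pvFilled colors n L m dp) : pvFilled colors n L' m' dp := by
  intro i j hi hj
  rw [H i j hi hj]
  exact if_congr (and_congr_right fun hij => h i j hi hj hij) rfl rfl

theorem diag_loop (colors : List Int) (n : Nat) : ∀ (c s : Nat) (dp : List (List (Option Int))),
    pvShape n dp → pvFilled colors n 0 s dp → s + c ≤ n →
    pvShape n ((List.range' s c).foldl (fun dp i => pvSet2 dp i i (some 1)) dp) ∧
    pvFilled colors n 0 (s + c) ((List.range' s c).foldl (fun dp i => pvSet2 dp i i (some 1)) dp) := by
  intro c
  induction c with
  | zero => intro s dp hs H _; simpa using ⟨hs, H⟩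
  | succ c ih =>
    intro s dp hs H hb
    have hrange : List.range' s (c+1) = s :: List.range' (s+1) c := by simp [List.range'_succ]
    rw [hrange, List.foldl_cons]
    have hsn : s < n := by omega
    have hs' : pvShape n (pvSet2 dp s s (some 1)) := pvShape_set2 n dp hs s s (some 1)
    have H' : pvFilled colors n 0 (s+1) (pvSet2 dp s s (some 1)) := by
      intro i j hi hj
      rw [pvGet2_set2 n dp hs s s hsn hsn (some 1) i j]
      by_cases hc : i = s ∧ j = s
      · rcases hc with ⟨h1, h2⟩; subst h1; subst h2
        rw [if_pos ⟨rfl, rfl⟩, if_pos ⟨by omega, Or.inr ⟨by omega, by omega⟩⟩, pvS_diag]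
      · rw [if_neg hc, H i j hi hj]
        refine if_congr (and_congr_right fun hij => ?_) rfl rfl
        rcases not_and_or.mp hc with h | h <;>
          exact ⟨fun hx => by omega, fun hx => by omega⟩
    have := ih (s+1) (pvSet2 dp s s (some 1)) hs' H' (by omega)
    rwa [(by omega : s + (c+1) = (s+1) + c)]

theorem adj_loop (colors : List Int) (n : Nat) : ∀ (c s : Nat) (dp : List (List (Option Int))),
    pvShape n dp → pvFilled colors n 1 s dp → s + c ≤ n - 1 →
    pvShape n ((List.range' s c).foldl
      (fun dp i => pvSet2 dp i (i+1) (some (if colors.getD i 0 = colors.getD (i+1) 0 then (1:Int) else 2))) dp) ∧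
    pvFilled colors n 1 (s + c) ((List.range' s c).foldl
      (fun dp i => pvSet2 dp i (i+1) (some (if colors.getD i 0 = colors.getD (i+1) 0 then (1:Int) else 2))) dp) := by
  intro c
  induction c with
  | zero => intro s dp hs H _; simpa using ⟨hs, H⟩
  | succ c ih =>
    intro s dp hs H hb
    have hrange : List.range' s (c+1) = s :: List.range' (s+1) c := by simp [List.range'_succ]
    rw [hrange, List.foldl_cons]
    have hsn : s < n := by omega
    have hsn1 : s + 1 < n := by omega
    set v : Option Int := some (if colors.getD s 0 = colors.getD (s+1) 0 then (1:Int) else 2) with hv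
    have hs' : pvShape n (pvSet2 dp s (s+1) v) := pvShape_set2 n dp hs s (s+1) v
    have H' : pvFilled colors n 1 (s+1) (pvSet2 dp s (s+1) v) := by
      intro i j hi hj
      rw [pvGet2_set2 n dp hs s (s+1) hsn hsn1 v i j]
      by_cases hc : i = s ∧ j = s + 1
      · rcases hc with ⟨h1, h2⟩; subst h1; subst h2
        rw [if_pos ⟨rfl, rfl⟩, if_pos ⟨by omega, Or.inr ⟨by omega, by omega⟩⟩, pvS_adj, hv]
      · rw [if_neg hc, H i j hi hj]
        refine if_congr (and_congr_right fun hij => ?_) rfl rfl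
        rcases not_and_or.mp hc with h | h <;>
          exact ⟨fun hx => by omega, fun hx => by omega⟩
    have := ih (s+1) (pvSet2 dp s (s+1) v) hs' H' (by omega)
    rwa [(by omega : s + (c+1) = (s+1) + c)]

theorem midfold (n left right : Nat) (hl : left < n) (hr : right < n) :
    ∀ (ms : List Nat) (dp : List (List (Option Int))), pvShape n dp →
    (∀ mid ∈ ms, left ≤ mid ∧ mid < right) →
    pvShape n (ms.foldl (pvBodyMid left right) dp) ∧
    (∀ i j, ¬(i = left ∧ j = right) → pvGet2 (ms.foldl (pvBodyMid left right) dp) i j = pvGet2 dp i j) ∧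
    pvGet2 (ms.foldl (pvBodyMid left right) dp) left right =
      ms.foldl (fun acc mid => pvMinO acc (pvAddO (pvGet2 dp left mid) (pvGet2 dp (mid+1) right)))
        (pvGet2 dp left right) := by
  intro ms
  induction ms with
  | nil => intro dp hs _; exact ⟨hs, fun _ _ _ => rfl, rfl⟩
  | cons m ms ih =>
    intro dp hs hmem
    have hm := hmem m (List.mem_cons_self)
    set X : Option Int :=
      pvMinO (pvGet2 dp left right) (pvAddO (pvGet2 dp left m) (pvGet2 dp (m+1) right)) with hX
    have hbody : pvBodyMid left right dp m = pvSet2 dp left right X := rfl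
    have hs' : pvShape n (pvSet2 dp left right X) := pvShape_set2 n dp hs left right X
    have hget : ∀ i j, ¬(i = left ∧ j = right) →
        pvGet2 (pvSet2 dp left right X) i j = pvGet2 dp i j := by
      intro i j hc
      rw [pvGet2_set2 n dp hs left right hl hr X i j, if_neg hc]
    have hcell : pvGet2 (pvSet2 dp left right X) left right = X := by
      rw [pvGet2_set2 n dp hs left right hl hr X left right, if_pos ⟨rfl, rfl⟩]
    obtain ⟨S1, S2, S3⟩ := ih (pvSet2 dp left right X) hs'
      (fun mid hmid => hmem mid (List.mem_cons_of_mem m hmid))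
    rw [List.foldl_cons, List.foldl_cons, hbody]
    refine ⟨S1, ?_, ?_⟩
    · intro i j hc
      rw [S2 i j hc, hget i j hc]
    · rw [S3, hcell]
      apply PySem.List.foldl_congr_mem
      intro acc mid hmid
      have hmm := hmem mid (List.mem_cons_of_mem m hmid)
      rw [hget left mid (by omega), hget (mid+1) right (by omega)]

theorem left_loop (colors : List Int) (n s : Nat) (hs3 : 3 ≤ s) :
    ∀ (c m : Nat) (dp : List (List (Option Int))),
    pvShape n dp → pvFilled colors n (s-1) m dp → m + c + s ≤ n + 1 →
    pvShape n ((List.range' m c).foldl (pvBodyLeft colors s) dp) ∧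
    pvFilled colors n (s-1) (m + c) ((List.range' m c).foldl (pvBodyLeft colors s) dp) := by
  intro c
  induction c with
  | zero => intro m dp hs H _; simpa using ⟨hs, H⟩
  | succ c ih =>
    intro m dp hs H hb
    have hrange : List.range' m (c+1) = m :: List.range' (m+1) c := by simp [List.range'_succ]
    rw [hrange, List.foldl_cons]
    set right := m + s - 1 with hright
    have hrn : right < n := by omega
    have hmn : m < n := by omega
    have hm2 : m + 2 ≤ right := by omega
    -- the seeded value of cell (m, right) after the optional ends-merge
    set base : Option Int :=
      if colors.getD m 0 = colors.getD right 0 then some (pvS colors (m+1) (right-1)) else none with hbase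
    set dpA : List (List (Option Int)) :=
      if colors.getD m 0 = colors.getD right 0
      then pvSet2 dp m right (pvGet2 dp (m+1) (right-1)) else dp with hdpA
    have hbodyL : pvBodyLeft colors s dp m =
        (List.range' m (right - m)).foldl (pvBodyMid m right) dpA := rfl
    have hsA : pvShape n dpA := by
      rw [hdpA]; split_ifs
      · exact pvShape_set2 n dp hs m right _
      · exact hs
    have hreadIn : pvGet2 dp (m+1) (right-1) = some (pvS colors (m+1) (right-1)) := by
      rw [H (m+1) (right-1) (by omega) (by omega), if_pos ⟨by omega, Or.inl (by omega)⟩]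
    have hA1 : pvGet2 dpA m right = base := by
      rw [hdpA, hbase]; split_ifs with hcol
      · rw [pvGet2_set2 n dp hs m right hmn hrn _ m right, if_pos ⟨rfl, rfl⟩, hreadIn]
      · rw [H m right hmn hrn, if_neg (by omega)]
    have hA2 : ∀ i j, ¬(i = m ∧ j = right) → pvGet2 dpA i j = pvGet2 dp i j := by
      intro i j hc
      rw [hdpA]; split_ifs
      · rw [pvGet2_set2 n dp hs m right hmn hrn _ i j, if_neg hc]
      · rfl
    obtain ⟨S1, S2, S3⟩ := midfold n m right hmn hrn (List.range' m (right - m)) dpA hsA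
      (by intro mid hmid; rw [List.mem_range'_1] at hmid; omega)
    have hcell : pvGet2 ((List.range' m (right - m)).foldl (pvBodyMid m right) dpA) m right
        = some (pvS colors m right) := by
      rw [S3, hA1]
      have hfold : (List.range' m (right - m)).foldl
          (fun acc mid => pvMinO acc (pvAddO (pvGet2 dpA m mid) (pvGet2 dpA (mid+1) right))) base
          = (List.range' m (right - m)).foldl
          (fun acc mid => pvMinO acc (some (pvS colors m mid + pvS colors (mid+1) right))) base := by
        apply PySem.List.foldl_congr_mem
        intro acc mid hmid
        rw [List.mem_range'_1] at hmid
        rw [hA2 m mid (by omega), hA2 (mid+1) right (by omega),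
            H m mid hmn (by omega), if_pos ⟨by omega, Or.inl (by omega)⟩,
            H (mid+1) right (by omega) hrn, if_pos ⟨by omega, Or.inl (by omega)⟩]
        rfl
      rw [hfold]
      exact pvSO_eq colors m right hm2
    have H' : pvFilled colors n (s-1) (m+1)
        ((List.range' m (right - m)).foldl (pvBodyMid m right) dpA) := by
      intro i j hi hj
      by_cases hc : i = m ∧ j = right
      · rcases hc with ⟨h1, h2⟩; subst h1; subst h2
        rw [hcell, if_pos ⟨by omega, Or.inr ⟨by omega, by omega⟩⟩]
      · rw [S2 i j hc, hA2 i j hc, H i j hi hj]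
        refine if_congr (and_congr_right fun hij => ?_) rfl rfl
        rcases not_and_or.mp hc with h | h <;>
          exact ⟨fun hx => by omega, fun hx => by omega⟩
    have := ih (m+1) ((List.range' m (right - m)).foldl (pvBodyMid m right) dpA) S1 H' (by omega)
    rw [hbodyL]
    rwa [(by omega : m + (c+1) = (m+1) + c)]

theorem len_loop (colors : List Int) (n : Nat) : ∀ (c s : Nat) (dp : List (List (Option Int))),
    3 ≤ s → pvShape n dp → pvFilled colors n (s-1) 0 dp → c ≤ n + 1 - s →
    pvShape n ((List.range' s c).foldl (pvBodyLen colors n) dp) ∧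
    pvFilled colors n (s + c - 1) 0 ((List.range' s c).foldl (pvBodyLen colors n) dp) := by
  intro c
  induction c with
  | zero => intro s dp hs3 hs H _; simpa using ⟨hs, H⟩
  | succ c ih =>
    intro s dp hs3 hs H hb
    have hsn : s ≤ n := by omega
    have hrange : List.range' s (c+1) = s :: List.range' (s+1) c := by simp [List.range'_succ]
    rw [hrange, List.foldl_cons]
    have hbody : pvBodyLen colors n dp s = (List.range' 0 (n - s + 1)).foldl (pvBodyLeft colors s) dp := rfl
    obtain ⟨S1, S2⟩ := left_loop colors n s hs3 (n - s + 1) 0 dp hs H (by omega)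
    have H' : pvFilled colors n ((s+1)-1) 0 ((List.range' 0 (n - s + 1)).foldl (pvBodyLeft colors s) dp) := by
      refine pvFilled_shift colors n (s-1) (0 + (n - s + 1)) ((s+1)-1) 0 _ ?_ S2
      intro i j hi hj hij
      constructor <;> intro hx <;> omega
    have := ih (s+1) ((List.range' 0 (n - s + 1)).foldl (pvBodyLeft colors s) dp) (by omega) S1 H' (by omega)
    rw [hbody]
    rwa [(by omega : s + (c+1) - 1 = (s+1) + c - 1)]

theorem min_shot_eq (colors : List Int) (h : colors ≠ []) :
    min_shot colors = min_shot_alt colors := by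
  have hn : 1 ≤ colors.length := List.length_pos_of_ne_nil h
  simp only [min_shot]
  set n := colors.length with hn'
  set dp0 := List.replicate n (List.replicate n (none : Option Int)) with hdp0
  have F0 : pvFilled colors n 0 0 dp0 := by
    intro i j hi hj
    rw [hdp0, pvGet2_replicate, if_neg (by omega)]
  obtain ⟨sh1, F1⟩ := diag_loop colors n n 0 dp0 (pvShape_replicate n) F0 (by omega)
  have F1' := pvFilled_shift colors n 0 (0 + n) 1 0 _
    (fun i j hi hj hij => by constructor <;> intro hx <;> omega) F1
  obtain ⟨sh2, F2⟩ := adj_loop colors n (n-1) 0 _ sh1 F1' (by omega)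
  have F2' := pvFilled_shift colors n 1 (0 + (n-1)) 2 0 _
    (fun i j hi hj hij => by constructor <;> intro hx <;> omega) F2
  obtain ⟨sh3, F3⟩ := len_loop colors n (n-2) 3 _ (by omega) sh2 F2' (by omega)
  rw [F3 0 (n-1) (by omega) (by omega), if_pos ⟨by omega, Or.inl (by omega)⟩]
  show (some (pvS colors 0 (n-1))).getD 0 = min_shot_alt colors
  simp only [pvS, min_shot_alt, Option.getD_some, Nat.sub_zero, hn']

-- ===== VERDICT (by name: the statement is the Claim_ definition above) =====
theorem min_shot_spec : Claim_equal_min_shot := by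
  intro colors _ hpre
  unfold Spec_min_shot
  exact min_shot_eq colors hpre
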